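-- pv_equiv track=rewrite | github.com/egokul71435/deep_learning_distillation | dataset.py | _align_teacher_to_student
-- ===== SOURCE A (Python) =====
-- def _build_char_offsets(tokens):
--     """Return a list of (start, end) character offsets for each token."""
--     offsets = []
--     pos = 0
--     for t in tokens:
--         offsets.append((pos, pos + len(t)))
--         pos += len(t)
--     return offsets
--
-- def _align_teacher_to_student(teacher_tokens, student_tokens):
--     """Map each student-token position to the best-matching teacher-token position.
--
--     Returns ``alignment`` (len = len(student_tokens)) where alignment[i] is the
--     teacher-token index whose character span overlaps the start of student token i,
--     or -1 when no good match exists.  Also returns a boolean list ``exact`` that is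
--     True when the teacher and student tokens at that position are the *same* string
--     (i.e. they represent the same sub-word and logit KD is meaningful).
--     """
--     t_off = _build_char_offsets(teacher_tokens)
--     s_off = _build_char_offsets(student_tokens)
--
--     alignment = []
--     exact = []
--     ti = 0
--     for si in range(len(s_off)):
--         s_start, s_end = s_off[si]
--         # advance teacher pointer to cover student start
--         while ti < len(t_off) - 1 and t_off[ti][1] <= s_start:
--             ti += 1
--         if ti < len(t_off) and t_off[ti][0] <= s_start < t_off[ti][1]:
--             alignment.append(ti)
--             exact.append(teacher_tokens[ti] == student_tokens[si])
--         else: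
--             alignment.append(-1)
--             exact.append(False)
--     return alignment, exact
-- ===== SOURCE B (Python) =====
-- def _align_teacher_to_student(teacher_tokens, student_tokens):
--     # Build a character-ownership table once: owner[c] is the index of the
--     # teacher token whose span covers character c.  Each student token is then
--     # aligned by a single O(1) lookup at its start character.
--     owner = []
--     for i, t in enumerate(teacher_tokens):
--         owner.extend([i] * len(t))
--     total = len(owner)
--     alignment = []
--     exact = []
--     pos = 0
--     for tok in student_tokens:
--         if pos < total:
--             ti = owner[pos]
--             alignment.append(ti)
--             exact.append(teacher_tokens[ti] == tok)
--         else: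
--             alignment.append(-1)
--             exact.append(False)
--         pos += len(tok)
--     return alignment, exact
-- ===== Notes on version B (the rewrite author's own statement) =====
-- stated objective: alternative
-- what changed: Replaces the stateful two-pointer scan over teacher offsets by a character-ownership table built once (owner[c] = teacher token covering char c), so each student token is aligned by one array lookup at its start character.
import Mathlib
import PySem

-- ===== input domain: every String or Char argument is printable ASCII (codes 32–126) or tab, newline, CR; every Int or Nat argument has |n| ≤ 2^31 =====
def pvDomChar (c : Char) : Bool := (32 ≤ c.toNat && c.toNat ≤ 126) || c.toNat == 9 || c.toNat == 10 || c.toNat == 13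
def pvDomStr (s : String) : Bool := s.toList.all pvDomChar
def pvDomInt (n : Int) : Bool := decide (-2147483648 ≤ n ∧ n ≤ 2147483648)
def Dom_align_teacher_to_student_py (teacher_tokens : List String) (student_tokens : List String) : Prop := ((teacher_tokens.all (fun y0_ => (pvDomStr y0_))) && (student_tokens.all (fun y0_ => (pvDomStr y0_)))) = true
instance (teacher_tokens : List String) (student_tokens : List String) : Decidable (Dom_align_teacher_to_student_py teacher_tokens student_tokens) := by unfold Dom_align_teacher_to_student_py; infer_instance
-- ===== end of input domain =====

-- B replaces A's stateful two-pointer scan over teacher offsets by a character-ownership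
-- table built once, so each student token is aligned by one lookup (objective: alternative).

-- ===== PORT A =====
-- _build_char_offsets: positions are Nats (Python len is nonnegative); len(t) = t.toList.length (exact on the domain)
def pvOffA (tokens : List String) : List (Nat × Nat) :=
  (tokens.foldl (fun (st : List (Nat × Nat) × Nat) t =>
      (st.1 ++ [(st.2, st.2 + t.toList.length)], st.2 + t.toList.length)) ([], 0)).1

-- the inner `while ti < len(t_off) - 1 and t_off[ti][1] <= s_start: ti += 1`
-- (Python `ti < len - 1` over ints = `ti + 1 < len` here; t_off[ti] is in range whenever read)
def pvAdv (toff : List (Nat × Nat)) (s ti : Nat) : Nat :=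
  if ti + 1 < toff.length ∧ (toff.getD ti (0, 0)).2 ≤ s then pvAdv toff s (ti + 1) else ti
termination_by toff.length - ti
decreasing_by omega

-- the `for si in range(len(s_off))` loop; iterates over s_off zipped with student_tokens
def pvLoopA (teacher : List String) (toff : List (Nat × Nat)) :
    List ((Nat × Nat) × String) → Nat → List Int × List Bool
  | [], _ => ([], [])
  | ((s_start, _s_end), tok) :: rest, ti =>
    let ti' := pvAdv toff s_start ti
    let hd : List Int × List Bool :=
      if ti' < toff.length ∧ (toff.getD ti' (0, 0)).1 ≤ s_start ∧ s_start < (toff.getD ti' (0, 0)).2 then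
        ([(ti' : Int)], [teacher.getD ti' "" == tok])
      else ([(-1 : Int)], [false])
    let res := pvLoopA teacher toff rest ti'
    (hd.1 ++ res.1, hd.2 ++ res.2)

def align_teacher_to_student_py (teacher_tokens : List String) (student_tokens : List String) : List Int × List Bool :=
  pvLoopA teacher_tokens (pvOffA teacher_tokens) ((pvOffA student_tokens).zip student_tokens) 0

-- ===== PORT B =====
-- owner table: for i, t in enumerate(teacher_tokens): owner.extend([i] * len(t))
def pvOwner (tokens : List String) : List Nat :=
  (tokens.foldl (fun (st : List Nat × Nat) t =>
      (st.1 ++ List.replicate t.toList.length st.2, st.2 + 1)) ([], 0)).1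

def pvLoopB (teacher : List String) (owner : List Nat) : List String → Nat → List Int × List Bool
  | [], _ => ([], [])
  | tok :: rest, pos =>
    let hd : List Int × List Bool :=
      if pos < owner.length then
        let ti := owner.getD pos 0
        ([(ti : Int)], [teacher.getD ti "" == tok])
      else ([(-1 : Int)], [false])
    let res := pvLoopB teacher owner rest (pos + tok.toList.length)
    (hd.1 ++ res.1, hd.2 ++ res.2)

def align_teacher_to_student_py_alt (teacher_tokens : List String) (student_tokens : List String) : List Int × List Bool :=
  pvLoopB teacher_tokens (pvOwner teacher_tokens) student_tokens 0

-- ===== PRECONDITION & SPEC =====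
def Spec_align_teacher_to_student_py (teacher_tokens : List String) (student_tokens : List String) (out : List Int × List Bool) : Prop := out = align_teacher_to_student_py_alt teacher_tokens student_tokens
instance (teacher_tokens : List String) (student_tokens : List String) (out : List Int × List Bool) : Decidable (Spec_align_teacher_to_student_py teacher_tokens student_tokens out) := by unfold Spec_align_teacher_to_student_py; infer_instance

-- ===== CLAIM (what is proved, stated in full; the proofs are below) =====
def Claim_equal_align_teacher_to_student_py : Prop := ∀ (teacher_tokens : List String) (student_tokens : List String), Dom_align_teacher_to_student_py teacher_tokens student_tokens → Spec_align_teacher_to_student_py teacher_tokens student_tokens (align_teacher_to_student_py teacher_tokens student_tokens)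

-- ===== LEMMAS AND PROOFS =====

-- recursive (accumulator-free) views of the two foldl-built tables, over the length list
def offsR : List Nat → Nat → List (Nat × Nat)
  | [], _ => []
  | l :: ls, p => (p, p + l) :: offsR ls (p + l)

def ownR : List Nat → Nat → List Nat
  | [], _ => []
  | l :: ls, i => List.replicate l i ++ ownR ls (i + 1)

def pref (ls : List Nat) (k : Nat) : Nat := (ls.take k).sum

lemma offA_aux (tokens : List String) : ∀ (acc : List (Nat × Nat)) (p : Nat),
    tokens.foldl (fun (st : List (Nat × Nat) × Nat) t =>
        (st.1 ++ [(st.2, st.2 + t.toList.length)], st.2 + t.toList.length)) (acc, p)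
      = (acc ++ offsR (tokens.map (fun t => t.toList.length)) p, p + (tokens.map (fun t => t.toList.length)).sum) := by
  induction tokens with
  | nil => intro acc p; simp [offsR]
  | cons t ts ih =>
    intro acc p
    simp only [List.foldl_cons, ih, List.map_cons, offsR, List.sum_cons, Prod.mk.injEq]
    exact ⟨by simp, by omega⟩

lemma pvOffA_eq (tokens : List String) : pvOffA tokens = offsR (tokens.map (fun t => t.toList.length)) 0 := by
  unfold pvOffA
  rw [offA_aux]
  simp

lemma ownA_aux (tokens : List String) : ∀ (acc : List Nat) (i : Nat),
    tokens.foldl (fun (st : List Nat × Nat) t =>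
        (st.1 ++ List.replicate t.toList.length st.2, st.2 + 1)) (acc, i)
      = (acc ++ ownR (tokens.map (fun t => t.toList.length)) i, i + tokens.length) := by
  induction tokens with
  | nil => intro acc i; simp [ownR]
  | cons t ts ih =>
    intro acc i
    simp only [List.foldl_cons, ih, List.map_cons, ownR, List.length_cons, Prod.mk.injEq]
    exact ⟨by simp, by omega⟩

lemma pvOwner_eq (tokens : List String) : pvOwner tokens = ownR (tokens.map (fun t => t.toList.length)) 0 := by
  unfold pvOwner
  rw [ownA_aux]
  simp

lemma offsR_length (ls : List Nat) (p : Nat) : (offsR ls p).length = ls.length := by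
  induction ls generalizing p with
  | nil => rfl
  | cons l ls ih => simp [offsR, ih]

lemma ownR_length (ls : List Nat) (i : Nat) : (ownR ls i).length = ls.sum := by
  induction ls generalizing i with
  | nil => rfl
  | cons l ls ih => simp [ownR, ih]

lemma pref_succ (l : Nat) (ls : List Nat) (k : Nat) : pref (l :: ls) (k + 1) = l + pref ls k := by
  simp [pref, List.take_succ_cons]

lemma sum_take_le (ls : List Nat) (k : Nat) : (ls.take k).sum ≤ ls.sum := by
  induction ls generalizing k with
  | nil => simp
  | cons l ls ih =>
    cases k with
    | zero => simp
    | succ k => simp only [List.take_succ_cons, List.sum_cons]; exact Nat.add_le_add_left (ih k) l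

lemma pref_mono (ls : List Nat) {a b : Nat} (h : a ≤ b) : pref ls a ≤ pref ls b := by
  have : ls.take a = (ls.take b).take a := by rw [List.take_take, Nat.min_eq_left h]
  unfold pref
  rw [this]
  exact sum_take_le _ a

lemma pref_le_sum (ls : List Nat) (k : Nat) : pref ls k ≤ ls.sum := sum_take_le ls k

lemma pref_ge_length (ls : List Nat) {k : Nat} (h : ls.length ≤ k) : pref ls k = ls.sum := by
  simp [pref, List.take_of_length_le h]

lemma offsR_getD (ls : List Nat) (p j : Nat) (hj : j < ls.length) :
    (offsR ls p).getD j (0, 0) = (p + pref ls j, p + pref ls (j + 1)) := by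
  induction ls generalizing p j with
  | nil => simp at hj
  | cons l ls ih =>
    cases j with
    | zero => simp [offsR, pref, List.take_succ_cons]
    | succ j =>
      have hj' : j < ls.length := by simpa using hj
      simp only [offsR, List.getD_cons_succ, ih (p + l) j hj', pref_succ, Prod.mk.injEq]
      exact ⟨by omega, by omega⟩

lemma ownR_getD (ls : List Nat) (i s : Nat) (hs : s < ls.sum) :
    ∃ j, j < ls.length ∧ (ownR ls i).getD s 0 = i + j ∧ pref ls j ≤ s ∧ s < pref ls (j + 1) := by
  induction ls generalizing i s with
  | nil => simp at hs
  | cons l ls ih =>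
    by_cases hsl : s < l
    · refine ⟨0, by simp, ?_, by simp [pref], ?_⟩
      · rw [ownR, List.getD_append _ _ _ _ (by simpa using hsl)]
        simp [hsl]
      · simp only [pref, List.take_succ_cons, List.take_zero, List.sum_cons, List.sum_nil]
        omega
    · have hs' : s - l < ls.sum := by simp only [List.sum_cons] at hs; omega
      obtain ⟨j, hj, hg, h1, h2⟩ := ih (i + 1) (s - l) hs'
      refine ⟨j + 1, by simpa using Nat.succ_lt_succ hj, ?_, ?_, ?_⟩
      · rw [ownR, List.getD_append_right _ _ _ _ (by simpa using hsl)]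
        simp only [List.length_replicate]
        omega
      · rw [pref_succ]; omega
      · rw [pref_succ]; omega

lemma pref_unique (ls : List Nat) {a b s : Nat}
    (ha : pref ls a ≤ s ∧ s < pref ls (a + 1)) (hb : pref ls b ≤ s ∧ s < pref ls (b + 1)) : a = b := by
  rcases Nat.lt_trichotomy a b with h | h | h
  · have := le_trans (pref_mono ls (show a + 1 ≤ b by omega)) hb.1; omega
  · exact h
  · have := le_trans (pref_mono ls (show b + 1 ≤ a by omega)) ha.1; omega

lemma pvAdv_spec (toff : List (Nat × Nat)) (s ti : Nat) :
    ti ≤ pvAdv toff s ti ∧ (pvAdv toff s ti = ti ∨ pvAdv toff s ti < toff.length) ∧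
    (∀ j, ti ≤ j → j < pvAdv toff s ti → (toff.getD j (0, 0)).2 ≤ s) ∧
    (pvAdv toff s ti + 1 < toff.length → s < (toff.getD (pvAdv toff s ti) (0, 0)).2) := by
  fun_induction pvAdv toff s ti with
  | case1 ti hcond ih =>
    obtain ⟨ia, ib, ic, id⟩ := ih
    refine ⟨by omega, Or.inr ?_, ?_, id⟩
    · rcases ib with h | h
      · omega
      · exact h
    · intro j h1 h2
      rcases Nat.eq_or_lt_of_le h1 with rfl | h1'
      · exact hcond.2
      · exact ic j h1' h2
  | case2 ti hcond =>
    refine ⟨le_refl _, Or.inl rfl, fun j h1 h2 => absurd (Nat.lt_of_le_of_lt h1 h2) (lt_irrefl _), ?_⟩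
    intro hlt
    by_contra hle
    exact hcond ⟨hlt, by omega⟩

lemma main_lemma (teacher : List String) (ls : List Nat) :
    ∀ (student : List String) (ti pos : Nat),
      (∀ j, j < ti → ((offsR ls 0).getD j (0, 0)).2 ≤ pos) →
      (ti = 0 ∨ ti < ls.length) →
      pvLoopA teacher (offsR ls 0) ((offsR (student.map (fun t => t.toList.length)) pos).zip student) ti
        = pvLoopB teacher (ownR ls 0) student pos := by
  intro student
  induction student with
  | nil => intro ti pos _ _; simp [pvLoopA, pvLoopB, offsR]
  | cons tok rest ih =>
    intro ti pos hinv hti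
    simp only [List.map_cons, offsR, List.zip_cons_cons, pvLoopA, pvLoopB]
    obtain ⟨ha, hb, hc, hd⟩ := pvAdv_spec (offsR ls 0) pos ti
    set r := pvAdv (offsR ls 0) pos ti with hr
    have hall : ∀ j, j < r → ((offsR ls 0).getD j (0, 0)).2 ≤ pos := by
      intro j hj
      by_cases h : j < ti
      · exact hinv j h
      · exact hc j (by omega) hj
    have hlen : (offsR ls 0).length = ls.length := offsR_length ls 0
    have holen : (ownR ls 0).length = ls.sum := ownR_length ls 0
    have hreststep : ∀ j, j < r → ((offsR ls 0).getD j (0, 0)).2 ≤ pos + tok.toList.length :=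
      fun j hj => le_trans (hall j hj) (Nat.le_add_right _ _)
    have hrb : r = 0 ∨ r < ls.length := by
      rcases hb with h | h
      · rcases hti with h0 | h0 <;> omega
      · right; omega
    by_cases hpos : pos < ls.sum
    · -- student start lies inside the teacher span: both sides pick the covering token
      have hne : ls.length ≠ 0 := by
        intro h
        rw [List.length_eq_zero_iff] at h
        subst h; simp at hpos
      have hrn : r < ls.length := by rcases hrb with h | h <;> omega
      have hend : pos < ((offsR ls 0).getD r (0, 0)).2 := by
        by_cases h2 : r + 1 < (offsR ls 0).length
        · exact hd h2
        · have hge : ls.length ≤ r + 1 := by omega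
          rw [offsR_getD ls 0 r hrn]
          show pos < 0 + pref ls (r + 1)
          rw [pref_ge_length ls hge]
          omega
      have hstart : ((offsR ls 0).getD r (0, 0)).1 ≤ pos := by
        rcases Nat.eq_zero_or_pos r with h0 | hrpos
        · rw [h0, offsR_getD ls 0 0 (by omega)]; simp [pref]
        · have h1 := hall (r - 1) (by omega)
          rw [offsR_getD ls 0 (r - 1) (by omega)] at h1
          rw [offsR_getD ls 0 r hrn]
          have : r - 1 + 1 = r := by omega
          rw [this] at h1
          simpa using h1
      obtain ⟨j, hjlen, hjg, hj1, hj2⟩ := ownR_getD ls 0 pos hpos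
      have hrP := offsR_getD ls 0 r hrn
      have hrj : r = j := by
        apply pref_unique ls (s := pos) ?_ ⟨hj1, hj2⟩
        rw [hrP] at hstart hend
        simp at hstart hend
        exact ⟨hstart, hend⟩
      rw [if_pos ⟨by omega, hstart, hend⟩, if_pos (by omega : pos < (ownR ls 0).length)]
      rw [ih r (pos + tok.toList.length) hreststep hrb]
      have hgj : (ownR ls 0).getD pos 0 = r := by omega
      rw [hgj]
    · -- student start is past the teacher text: both sides emit -1/False
      rw [if_neg, if_neg (by omega : ¬ pos < (ownR ls 0).length)]
      · rw [ih r (pos + tok.toList.length) hreststep hrb]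
      · rintro ⟨h1, _h2, h3⟩
        rw [offsR_getD ls 0 r (by omega)] at h3
        have := pref_le_sum ls (r + 1)
        simp at h3
        omega

-- ===== VERDICT (by name: the statement is the Claim_ definition above) =====
theorem align_teacher_to_student_py_spec : Claim_equal_align_teacher_to_student_py := by
  intro teacher student _
  unfold Spec_align_teacher_to_student_py align_teacher_to_student_py align_teacher_to_student_py_alt
  rw [pvOffA_eq teacher, pvOffA_eq student, pvOwner_eq teacher]
  exact main_lemma teacher (teacher.map (fun t => t.toList.length)) student 0 0
    (fun j hj => absurd hj (Nat.not_lt_zero j)) (Or.inl rfl)
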